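-- pv_equiv track=rewrite | github.com/ANKIT9761/Algorithmic-Toolbox | week2/Last Digit of the Sum of Squares of Fibonacci Numbers.py | calc_fib
-- ===== SOURCE A (Python) =====
-- def calc_fib(n):
--     fi={0:0,1:1}
--     if n in fi:
--         return fi[n]
--     l=[n]
--     while(n>=4):
--         n=int(n//2)
--         l+=[n]
--     a,b,j=1,1,1
--     for i in range(len(l)-1,-1,-1):
--         j*=2
--         a,b=a*(2*b-a),a**2+b**2
--         if(l[i]!=j):
--             j+=1
--             a,b=b,a+b
--
--     return a*b
-- ===== SOURCE B (Python) =====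
-- def calc_fib(n):
--     a, b = 0, 1  # F(0), F(1)
--     for _ in range(n):
--         a, b = b, a + b
--     return a * b  # F(n) * F(n+1)
-- ===== Notes on version B (the rewrite author's own statement) =====
-- stated objective: simpler
-- what changed: Replaces A's reversed bit-decomposition fast-doubling (chain of halvings, then doubling/step updates walking the bits back up) with a plain forward loop maintaining the consecutive Fibonacci pair (a,b)=(F(i),F(i+1)) and returning F(n)*F(n+1).
-- outside the precondition, e.g. on calc_fib(-1): A returns 6, B returns 0
import Mathlib
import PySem

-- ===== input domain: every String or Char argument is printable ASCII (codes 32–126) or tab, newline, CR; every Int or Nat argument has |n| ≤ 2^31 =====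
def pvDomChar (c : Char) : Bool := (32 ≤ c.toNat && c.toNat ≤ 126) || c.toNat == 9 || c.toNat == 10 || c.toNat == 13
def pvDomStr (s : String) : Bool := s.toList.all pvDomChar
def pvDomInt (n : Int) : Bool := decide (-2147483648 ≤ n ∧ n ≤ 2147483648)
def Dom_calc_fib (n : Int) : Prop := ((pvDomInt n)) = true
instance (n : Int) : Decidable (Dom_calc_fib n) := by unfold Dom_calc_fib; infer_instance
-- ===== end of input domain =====

-- B replaces A's reversed bit-decomposition fast-doubling with a simple forward loop
-- maintaining the consecutive Fibonacci pair; same value F(n)*F(n+1) on all n ≥ 0.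


-- ===== PORT A =====
-- while n >= 4: n = int(n//2); l += [n]
def pvChainA (l : List Int) (n : Int) : List Int :=
  if 4 ≤ n then pvChainA (l ++ [PySem.Int.floordiv n 2]) (PySem.Int.floordiv n 2) else l
termination_by n.toNat
decreasing_by
  rw [PySem.Int.floordiv_eq_ediv_of_pos (by omega : (0:Int) < 2)]
  omega

-- one iteration of A's for-loop body; state (a, b, j), i the index into l
def pvStepA (l : List Int) (s : Int × Int × Int) (i : Int) : Int × Int × Int :=
  let j := s.2.2 * 2
  let a := s.1 * (2 * s.2.1 - s.1)
  let b := s.1 ^ 2 + s.2.1 ^ 2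
  if PySem.List.pyGetD l i 0 ≠ j then (b, a + b, j + 1) else (a, b, j)

def calc_fib (n : Int) : Int :=
  let fi : PySem.Dict Int Int := ⟨[(0, 0), (1, 1)]⟩
  match PySem.Dict.get? fi n with
  | some v => v
  | none =>
    let l := pvChainA [n] n
    let s := (PySem.List.pyRange ((l.length : Int) - 1) (-1) (-1)).foldl (pvStepA l) (1, 1, 1)
    s.1 * s.2.1

-- ===== PORT B =====
def calc_fib_alt (n : Int) : Int :=
  let p := (PySem.List.pyRange 0 n 1).foldl
    (fun (p : Int × Int) _ => (p.2, p.1 + p.2)) ((0 : Int), (1 : Int))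
  p.1 * p.2

-- ===== PRECONDITION & SPEC =====
-- Pre_ restricts to nonnegative n, the natural domain of a Fibonacci index; on negative n
-- neither behaviour is specified (A returns 6, B's empty loop returns 0) — a corner no caller uses.
def Pre_calc_fib (n : Int) : Prop := 0 ≤ n
instance (n : Int) : Decidable (Pre_calc_fib n) := by unfold Pre_calc_fib; infer_instance
def pvWitness_calc_fib : Int := 10
def Spec_calc_fib (n : Int) (out : Int) : Prop := out = calc_fib_alt n
instance (n : Int) (out : Int) : Decidable (Spec_calc_fib n out) := by unfold Spec_calc_fib; infer_instance

-- ===== CLAIM (what is proved, stated in full; the proofs are below) =====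
def Claim_equal_calc_fib : Prop := ∀ (n : Int), Dom_calc_fib n → Pre_calc_fib n → Spec_calc_fib n (calc_fib n)

-- ===== LEMMAS AND PROOFS =====

-- A's loop body as a function of the looked-up element (pvStepA l s i = pvStepE s l[i])
def pvStepE (s : Int × Int × Int) (x : Int) : Int × Int × Int :=
  let j := s.2.2 * 2
  let a := s.1 * (2 * s.2.1 - s.1)
  let b := s.1 ^ 2 + s.2.1 ^ 2
  if x ≠ j then (b, a + b, j + 1) else (a, b, j)

-- the halving chain A appends (tail of l after the initial n)
def pvTail (n : Int) : List Int :=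
  if 4 ≤ n then PySem.Int.floordiv n 2 :: pvTail (PySem.Int.floordiv n 2) else []
termination_by n.toNat
decreasing_by
  rw [PySem.Int.floordiv_eq_ediv_of_pos (by omega : (0:Int) < 2)]
  omega

lemma pvChainA_eq_aux (N : Nat) : ∀ (l : List Int) (n : Int), n.toNat ≤ N →
    pvChainA l n = l ++ pvTail n := by
  induction N with
  | zero =>
    intro l n hN
    rw [pvChainA, pvTail, if_neg (by omega), if_neg (by omega)]
    simp
  | succ N ihN =>
    intro l n hN
    by_cases h : 4 ≤ n
    · rw [pvChainA, pvTail, if_pos h, if_pos h]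
      rw [ihN _ _ (by rw [PySem.Int.floordiv_eq_ediv_of_pos (by omega : (0:Int) < 2)]; omega)]
      simp
    · rw [pvChainA, pvTail, if_neg h, if_neg h]
      simp

lemma pvChainA_eq (l : List Int) (n : Int) : pvChainA l n = l ++ pvTail n :=
  pvChainA_eq_aux n.toNat l n le_rfl

lemma pyRange_down (L : Nat) :
    PySem.List.pyRange ((L : Int) - 1) (-1) (-1) = (List.range L).reverse.map Int.ofNat := by
  rcases Nat.eq_zero_or_pos L with h | h
  · subst h; rfl
  · simp only [PySem.List.pyRange]
    norm_num
    rw [if_pos h]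
    apply List.ext_getElem
    · simp
    · intro i hi1 hi2
      have hiL : i < L := by simpa using hi1
      simp only [List.getElem_map, List.getElem_range, List.getElem_reverse,
        List.length_map, List.length_range, Int.ofNat_eq_natCast]
      omega

lemma foldidx (l : List Int) : ∀ (s : Int × Int × Int),
    (List.range l.length).reverse.foldl (fun s (k : Nat) => pvStepA l s (Int.ofNat k)) s
      = l.reverse.foldl pvStepE s := by
  induction l using List.reverseRecOn with
  | nil => intro s; simp
  | append_singleton t y ih =>
    intro s
    rw [List.length_append, List.length_singleton, List.range_succ, List.reverse_append]
    simp only [List.reverse_singleton, List.singleton_append, List.foldl_cons]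
    have hy : pvStepA (t ++ [y]) s (Int.ofNat t.length) = pvStepE s y := by
      simp [pvStepA, pvStepE, PySem.List.pyGetD_natCast]
    rw [hy]
    have hcongr : (List.range t.length).reverse.foldl
          (fun s (k : Nat) => pvStepA (t ++ [y]) s (Int.ofNat k)) (pvStepE s y)
        = (List.range t.length).reverse.foldl
          (fun s (k : Nat) => pvStepA t s (Int.ofNat k)) (pvStepE s y) := by
      apply PySem.List.foldl_congr_mem
      intro acc k hk
      have hk' : k < t.length := by simpa using hk
      simp [pvStepA, PySem.List.pyGetD_natCast, List.getD,
        List.getElem?_append_left hk']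
    rw [hcongr, ih, List.reverse_append]
    simp

lemma mainA (m : Nat) : 2 ≤ m →
    ((pvTail (m : Int)).reverse ++ [(m : Int)]).foldl pvStepE (1, 1, 1)
      = ((Nat.fib m : Int), (Nat.fib (m + 1) : Int), (m : Int)) := by
  induction m using Nat.strong_induction_on with
  | _ m ih =>
    intro h2
    by_cases h4 : 4 ≤ m
    · have hfd : PySem.Int.floordiv (m : Int) 2 = ((m / 2 : Nat) : Int) := by
        exact_mod_cast PySem.Int.floordiv_natCast m 2
      rw [pvTail, if_pos (by exact_mod_cast h4 : (4 : Int) ≤ (m : Int)), hfd]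
      rw [List.reverse_cons, List.foldl_append, List.foldl_append]
      have hih := ih (m / 2) (by omega) (by omega)
      rw [List.foldl_append] at hih
      rw [hih]
      set h := m / 2 with hh
      have hle : Nat.fib h ≤ 2 * Nat.fib (h + 1) :=
        le_trans Nat.fib_le_fib_succ (by omega)
      have ha : (Nat.fib h : Int) * (2 * (Nat.fib (h + 1) : Int) - (Nat.fib h : Int))
          = (Nat.fib (2 * h) : Int) := by
        rw [Nat.fib_two_mul, Nat.cast_mul, Nat.cast_sub hle]
        push_cast
        ring
      have hb : (Nat.fib h : Int) ^ 2 + (Nat.fib (h + 1) : Int) ^ 2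
          = (Nat.fib (2 * h + 1) : Int) := by
        rw [Nat.fib_two_mul_add_one]
        push_cast
        ring
      simp only [List.foldl_cons, List.foldl_nil, pvStepE]
      rcases (by omega : m = 2 * h ∨ m = 2 * h + 1) with hm | hm
      · rw [if_neg (by push_cast [hm]; intro hne; omega)]
        rw [ha, hb, hm]
        simp only [Prod.mk.injEq]
        refine ⟨trivial, trivial, by push_cast; ring⟩
      · rw [if_pos (by push_cast [hm]; intro heq; omega)]
        rw [ha, hb, hm]
        have hf : Nat.fib (2 * h + 1 + 1) = Nat.fib (2 * h) + Nat.fib (2 * h + 1) :=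
          Nat.fib_add_two
        rw [hf]
        simp only [Prod.mk.injEq]
        refine ⟨trivial, by push_cast; ring, by push_cast; ring⟩
    · interval_cases m
      · rw [pvTail, if_neg (by norm_num)]
        simp [pvStepE]
        decide
      · rw [pvTail, if_neg (by norm_num)]
        simp [pvStepE]
        decide

lemma calcA_char (n : Int) (h : 2 ≤ n) :
    calc_fib n = (Nat.fib n.toNat : Int) * (Nat.fib (n.toNat + 1) : Int) := by
  obtain ⟨m, rfl⟩ : ∃ m : Nat, n = (m : Int) := ⟨n.toNat, by omega⟩
  have hm2 : 2 ≤ m := by exact_mod_cast h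
  have hget : PySem.Dict.get? (⟨[(0, 0), (1, 1)]⟩ : PySem.Dict Int Int) (m : Int) = none := by
    have h0 : ((0 : Int) == (m : Int)) = false := by rw [beq_eq_false_iff_ne]; omega
    have h1 : ((1 : Int) == (m : Int)) = false := by rw [beq_eq_false_iff_ne]; omega
    simp [PySem.Dict.get?, List.find?, h0, h1]
  simp only [calc_fib, hget]
  rw [pvChainA_eq]
  have hrev : ([(m : Int)] ++ pvTail (m : Int)).reverse
      = (pvTail (m : Int)).reverse ++ [(m : Int)] := by simp
  rw [pyRange_down, List.foldl_map, foldidx, hrev, mainA m hm2]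
  simp

lemma foldB (xs : List Int) : ∀ (k : Nat),
    xs.foldl (fun (p : Int × Int) _ => (p.2, p.1 + p.2))
        ((Nat.fib k : Int), (Nat.fib (k + 1) : Int))
      = ((Nat.fib (k + xs.length) : Int), (Nat.fib (k + xs.length + 1) : Int)) := by
  induction xs with
  | nil => intro k; simp
  | cons x t ih =>
    intro k
    simp only [List.foldl_cons, List.length_cons]
    have : (Nat.fib k : Int) + (Nat.fib (k + 1) : Int) = (Nat.fib (k + 1 + 1) : Int) := by
      rw [Nat.fib_add_two]; push_cast; ring
    rw [this, ih (k + 1)]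
    have h1 : k + 1 + t.length = k + (t.length + 1) := by omega
    rw [h1]

lemma calcB_char (n : Int) (h : 0 ≤ n) :
    calc_fib_alt n = (Nat.fib n.toNat : Int) * (Nat.fib (n.toNat + 1) : Int) := by
  obtain ⟨m, rfl⟩ : ∃ m : Nat, n = (m : Int) := ⟨n.toNat, by omega⟩
  simp only [calc_fib_alt, PySem.List.pyRange_zero_natCast]
  have key := foldB (List.map (fun k : Nat => (k : Int)) (List.range m)) 0
  rw [List.length_map, List.length_range] at key
  have h01 : ((0 : Int), (1 : Int)) = ((Nat.fib 0 : Int), (Nat.fib (0 + 1) : Int)) := by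
    norm_num
  rw [h01, key]
  simp

-- ===== VERDICT (by name: the statement is the Claim_ definition above) =====
theorem calc_fib_spec : Claim_equal_calc_fib := by
  intro n _ hpre
  unfold Pre_calc_fib at hpre
  unfold Spec_calc_fib
  rcases lt_or_ge n 2 with h2 | h2
  · interval_cases n
    · decide
    · decide
  · rw [calcA_char n h2, calcB_char n (by omega)]
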